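-- pv_equiv track=rewrite | github.com/lucken99/Qs | liveContest/cc1.py | f
-- ===== SOURCE A (Python) =====
-- def f(n, k, l):
-- 	a = []
-- 	for i in range(l):
-- 		for j in range(1, k+1):
-- 			if n == 0:
-- 				return a
-- 			a.append(j)
-- 			n -= 1
-- 	return a
-- ===== SOURCE B (Python) =====
-- def f(n, k, l):
--     cap = max(0, l) * max(0, k)
--     count = cap if n < 0 else min(n, cap)
--     return [i % k + 1 for i in range(count)]
-- ===== Notes on version B (the rewrite author's own statement) =====
-- stated objective: simpler
-- what changed: Replaces A's nested counting loops with an early return by a closed form: the output length count = cap if n<0 else min(n,cap) with cap = max(0,l)*max(0,k) is computed arithmetically, and element i is produced directly as i % k + 1.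
import Mathlib
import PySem

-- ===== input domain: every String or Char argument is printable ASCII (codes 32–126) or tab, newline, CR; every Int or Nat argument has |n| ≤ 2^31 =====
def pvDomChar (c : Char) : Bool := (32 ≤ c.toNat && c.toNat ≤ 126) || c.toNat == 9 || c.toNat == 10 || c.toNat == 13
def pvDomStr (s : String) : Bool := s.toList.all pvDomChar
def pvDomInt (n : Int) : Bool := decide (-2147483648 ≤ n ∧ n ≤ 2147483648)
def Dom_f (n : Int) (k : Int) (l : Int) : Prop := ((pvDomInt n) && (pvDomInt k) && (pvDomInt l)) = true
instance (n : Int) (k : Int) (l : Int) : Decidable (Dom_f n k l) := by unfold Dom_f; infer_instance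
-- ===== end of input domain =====

-- B replaces A's nested counting loops by a closed form: the output length is computed
-- arithmetically and each element is produced directly as (i % k) + 1 (objective: simpler).

-- ===== PORT A =====
-- inner 'for j in range(1, k+1)' loop; the Bool means 'the function returned early'
def fInner (js : List Int) (a : List Int) (n : Int) : List Int × Int × Bool :=
  match js with
  | [] => (a, n, false)
  | j :: rest => if n = 0 then (a, n, true) else fInner rest (a ++ [j]) (n - 1)

-- outer 'for i in range(l)' loop (the loop variable i is unused by the body)
def fOuter (is_ : List Int) (a : List Int) (n : Int) (k : Int) : List Int :=
  match is_ with
  | [] => a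
  | _ :: rest =>
    match fInner (PySem.List.pyRange 1 (k + 1) 1) a n with
    | (a', _, true) => a'
    | (a', n', false) => fOuter rest a' n' k

def f (n : Int) (k : Int) (l : Int) : List Int :=
  fOuter (PySem.List.pyRange 0 l 1) [] n k

-- ===== PORT B =====
def f_alt (n : Int) (k : Int) (l : Int) : List Int :=
  let cap := max 0 l * max 0 k
  let count := if n < 0 then cap else min n cap
  (PySem.List.pyRange 0 count 1).map (fun i => PySem.Int.mod i k + 1)

-- ===== PRECONDITION & SPEC =====
def Spec_f (n : Int) (k : Int) (l : Int) (out : List Int) : Prop := out = f_alt n k l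
instance (n : Int) (k : Int) (l : Int) (out : List Int) : Decidable (Spec_f n k l out) := by unfold Spec_f; infer_instance

-- ===== CLAIM (what is proved, stated in full; the proofs are below) =====
def Claim_equal_f : Prop := ∀ (n : Int) (k : Int) (l : Int), Dom_f n k l → Spec_f n k l (f n k l)

-- ===== LEMMAS AND PROOFS =====

-- the canonical value: c elements, i-th = i % K + 1 (K = k.toNat)
def pat (K : Nat) (c : Nat) : List Int := (List.range c).map (fun i => ((i % K : Nat) : Int) + 1)

-- the block [1, …, k]
theorem block_eq (k : Int) :
    PySem.List.pyRange 1 (k + 1) 1 = (List.range k.toNat).map (fun j : Nat => (1 : Int) + (j : Int)) := by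
  rw [PySem.List.pyRange_one]
  have h : k + 1 - 1 = k := by ring
  rw [h]

theorem block_length (k : Int) : (PySem.List.pyRange 1 (k + 1) 1).length = k.toNat := by
  simp [block_eq]

-- a full block prepended to the pattern
theorem pat_block_cons (k : Int) (c : Nat) :
    pat k.toNat (k.toNat + c) = PySem.List.pyRange 1 (k + 1) 1 ++ pat k.toNat c := by
  rw [block_eq, pat, pat, List.range_add, List.map_append]
  congr 1
  · apply List.map_congr_left
    intro j hj
    simp only [List.mem_range] at hj
    rw [Nat.mod_eq_of_lt hj]
    ring
  · rw [List.map_map]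
    apply List.map_congr_left
    intro j hj
    simp only [Function.comp]
    rw [Nat.add_mod_left]

-- a prefix of one block is the pattern of that length
theorem block_take (k : Int) (m : Nat) (hm : m ≤ k.toNat) :
    (PySem.List.pyRange 1 (k + 1) 1).take m = pat k.toNat m := by
  rw [block_eq, pat, ← List.map_take, List.take_range, Nat.min_eq_left hm]
  apply List.map_congr_left
  intro j hj
  simp only [List.mem_range] at hj
  rw [Nat.mod_eq_of_lt (by omega)]
  ring

-- inner loop, full-consumption case: n negative or at least the block length
theorem fInner_full (js : List Int) (a : List Int) (n : Int)
    (h : n < 0 ∨ (js.length : Int) ≤ n) :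
    fInner js a n = (a ++ js, n - js.length, false) := by
  induction js generalizing a n with
  | nil => simp [fInner]
  | cons j rest ih =>
    have hne : ¬ n = 0 := by
      rcases h with h | h
      · omega
      · simp only [List.length_cons] at h; push_cast at h; omega
    have harg : n - 1 < 0 ∨ (rest.length : Int) ≤ n - 1 := by
      rcases h with h | h
      · left; omega
      · right; simp only [List.length_cons] at h; push_cast at h; omega
    rw [fInner, if_neg hne, ih (a ++ [j]) (n - 1) harg]
    simp only [List.append_assoc, List.singleton_append, List.length_cons]
    congr 2
    push_cast
    ring

-- inner loop, partial case: 0 ≤ n < block length → early return with n elements taken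
theorem fInner_part (js : List Int) (a : List Int) (n : Int)
    (h0 : 0 ≤ n) (h1 : (n : Int) < js.length) :
    fInner js a n = (a ++ js.take n.toNat, 0, true) := by
  induction js generalizing a n with
  | nil => simp at h1; omega
  | cons j rest ih =>
    by_cases hn : n = 0
    · subst hn; simp [fInner]
    · rw [fInner, if_neg hn, ih (a ++ [j]) (n - 1) (by omega) (by simp at h1 ⊢; omega)]
      have hc : n.toNat = (n - 1).toNat + 1 := by omega
      rw [hc]
      simp

-- outer loop: full characterisation
theorem fOuter_eq (k : Int) (is_ : List Int) (a : List Int) (n : Int) :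
    fOuter is_ a n k =
      a ++ (if n < 0 then pat k.toNat (is_.length * k.toNat)
            else pat k.toNat (min n.toNat (is_.length * k.toNat))) := by
  induction is_ generalizing a n with
  | nil => simp [fOuter, pat]
  | cons i rest ih =>
    rw [fOuter]
    by_cases hneg : n < 0
    · rw [fInner_full _ _ _ (Or.inl hneg)]
      simp only
      rw [ih _ _, if_pos (by rw [block_length]; omega), if_pos hneg, List.append_assoc]
      congr 1
      have hlen : (i :: rest).length * k.toNat = k.toNat + rest.length * k.toNat := by
        simp [Nat.succ_mul, Nat.add_comm]
      rw [hlen, pat_block_cons]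
    · by_cases hlt : n < ((PySem.List.pyRange 1 (k + 1) 1).length : Int)
      · rw [fInner_part _ _ _ (by omega) hlt]
        simp only [if_neg hneg]
        rw [block_length] at hlt
        have hmin : min n.toNat ((i :: rest).length * k.toNat) = n.toNat := by
          simp only [List.length_cons]
          have : n.toNat ≤ k.toNat := by omega
          have : k.toNat ≤ (rest.length + 1) * k.toNat := by
            calc k.toNat = 1 * k.toNat := by ring
            _ ≤ (rest.length + 1) * k.toNat := Nat.mul_le_mul_right _ (by omega)
          omega
        rw [hmin, block_take k n.toNat (by omega)]
      · rw [block_length] at hlt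
        rw [fInner_full _ _ _ (Or.inr (by rw [block_length]; omega))]
        simp only
        rw [ih _ _, if_neg (by rw [block_length]; omega), if_neg hneg, List.append_assoc]
        congr 1
        rw [block_length]
        have hK : (k.toNat : Int) ≤ n := by omega
        have hmin : min n.toNat ((i :: rest).length * k.toNat)
            = k.toNat + min (n - k.toNat).toNat (rest.length * k.toNat) := by
          simp only [List.length_cons, Nat.succ_mul]
          omega
        rw [hmin, pat_block_cons]

theorem f_eq (n k l : Int) :
    f n k l = if n < 0 then pat k.toNat (l.toNat * k.toNat)
              else pat k.toNat (min n.toNat (l.toNat * k.toNat)) := by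
  rw [f, fOuter_eq]
  simp [PySem.List.length_pyRange_one]

theorem f_alt_eq (n k l : Int) :
    f_alt n k l = if n < 0 then pat k.toNat (l.toNat * k.toNat)
                  else pat k.toNat (min n.toNat (l.toNat * k.toNat)) := by
  rw [f_alt]
  by_cases hk : k ≤ 0
  · have h1 : max 0 k = 0 := by omega
    have h2 : k.toNat = 0 := by omega
    simp only [h1, Int.mul_zero, h2, Nat.mul_zero, Nat.min_zero]
    rw [PySem.List.pyRange_one_eq_nil (by split_ifs <;> omega)]
    simp [pat]
  · by_cases hl : l ≤ 0
    · have h1 : max 0 l = 0 := by omega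
      have h2 : l.toNat = 0 := by omega
      simp only [h1, Int.zero_mul, h2, Nat.zero_mul, Nat.min_zero]
      rw [PySem.List.pyRange_one_eq_nil (by split_ifs <;> omega)]
      simp [pat]
    · -- k > 0 and l > 0: cap = ↑(l.toNat * k.toNat)
      rw [not_le] at hk hl
      have hcap : max 0 l * max 0 k = ((l.toNat * k.toNat : Nat) : Int) := by
        rw [max_eq_right (by omega), max_eq_right (by omega)]
        push_cast
        rw [Int.toNat_of_nonneg (by omega), Int.toNat_of_nonneg (by omega)]
      set cnt : Int := if n < 0 then max 0 l * max 0 k else min n (max 0 l * max 0 k) with hcnt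
      have hcnt0 : 0 ≤ cnt := by
        rw [hcnt, hcap]; split_ifs with h <;> [positivity; omega]
      have hcntN : cnt.toNat = if n < 0 then l.toNat * k.toNat
          else min n.toNat (l.toNat * k.toNat) := by
        rw [hcnt, hcap]; split_ifs with h
        · omega
        · omega
      rw [PySem.List.pyRange_one]
      simp only [Int.sub_zero]
      rw [List.map_map]
      have : ∀ j ∈ List.range cnt.toNat,
          (((fun i => PySem.Int.mod i k + 1) ∘ fun m => (0 : Int) + ↑m) j)
            = ((j % k.toNat : Nat) : Int) + 1 := by
        intro j hj
        simp only [Function.comp, Int.zero_add]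
        have hkc : (k.toNat : Int) = k := Int.toNat_of_nonneg (by omega)
        have hm := PySem.Int.mod_natCast j k.toNat
        rw [hkc] at hm
        rw [hm]
      rw [List.map_congr_left this, ← pat]
      split_ifs with h
      · rw [hcntN, if_pos h]
      · rw [hcntN, if_neg h]

-- ===== VERDICT (by name: the statement is the Claim_ definition above) =====
theorem f_spec : Claim_equal_f := by
  intro n k l _
  unfold Spec_f
  rw [f_eq, f_alt_eq]
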